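-- pv_equiv track=rewrite | github.com/nktfh100/foobar | cake/main.py | solution
-- ===== SOURCE A (Python) =====
-- def count_substring(s, substr):
--     if(len(s) == 1):
--         if(s == substr):
--             return 1
--         return 0
--     if(substr == ""): # TODO
--         return 0
--     return len(s.split(substr)) - 1
--
-- def has_left_overs(s, substr):
--     substr_count = count_substring(s, substr)
--     if(substr_count * len(substr) != len(s)):
--         return True
--     return False
--
-- def solution(s):
--     solution = 0
--
--     for i in range(0, len(s)):
--         for i2 in range(0, len(s)):
--             substr = s[i:i2 + 1]
--             if(substr == ""):
--                 continue
--             if(has_left_overs(s, substr)):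
--                 continue
--             substr_count = count_substring(s, substr)
--             if(substr_count > solution):
--                 solution = substr_count
--     return solution
-- ===== SOURCE B (Python) =====
-- def solution(s):
--     n = len(s)
--     for d in range(1, n + 1):
--         if n % d == 0 and s[:d] * (n // d) == s:
--             return n // d
--     return 0
-- ===== Notes on version B (the rewrite author's own statement) =====
-- stated objective: faster
-- what changed: A enumerates all O(n^2) substrings and counts each one in the whole string via str.split; B scans prefix lengths d = 1..n once and returns n//d for the first divisor d of n whose length-d prefix tiles s, which is the same maximal piece count.
import Mathlib
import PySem

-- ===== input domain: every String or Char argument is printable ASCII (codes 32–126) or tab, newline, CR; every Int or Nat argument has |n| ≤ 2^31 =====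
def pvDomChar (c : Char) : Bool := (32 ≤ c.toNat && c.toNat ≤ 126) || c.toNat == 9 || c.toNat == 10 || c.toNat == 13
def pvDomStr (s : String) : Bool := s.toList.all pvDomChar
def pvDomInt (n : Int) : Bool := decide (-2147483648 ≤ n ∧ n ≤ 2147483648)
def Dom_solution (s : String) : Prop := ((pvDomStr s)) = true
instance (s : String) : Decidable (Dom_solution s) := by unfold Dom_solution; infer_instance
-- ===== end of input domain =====

-- B replaces A's scan of all O(n^2) substrings (each counted with str.split) by a single scan of
-- the candidate prefix lengths d = 1..n, returning n/d for the first divisor d of n whose prefix tiles s.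

-- ===== PORT A =====
def count_substring (s substr : List Char) : Int :=
  if s.length = 1 then (if s = substr then 1 else 0)
  else if substr = [] then 0
  else ((PySem.Chars.splitOn s substr).length : Int) - 1

def has_left_overs (s substr : List Char) : Bool :=
  if count_substring s substr * (substr.length : Int) ≠ (s.length : Int) then true else false

def solution (s : String) : Int :=
  let cs := s.toList
  (PySem.List.pyRange 0 (cs.length : Int) 1).foldl (fun sol i =>
    (PySem.List.pyRange 0 (cs.length : Int) 1).foldl (fun sol i2 =>
      let substr := PySem.List.slice cs (some i) (some (i2 + 1))
      if substr = [] then sol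
      else if has_left_overs cs substr then sol
      else
        let c := count_substring cs substr
        if c > sol then c else sol) sol) 0

-- ===== PORT B =====
-- Source B's for-loop with early return: try d = 1, 2, ..., n and return n//d at the first
-- divisor d of n such that s[:d] * (n//d) == s; fall through to 0 (only when n = 0)
def altGo (cs : List Char) (n d : Nat) : Int :=
  if d ≤ n then
    (if n % d = 0 ∧ (List.replicate (n / d) (cs.take d)).flatten = cs then ((n / d : Nat) : Int)
     else altGo cs n (d + 1))
  else 0
termination_by n + 1 - d

def solution_alt (s : String) : Int :=
  altGo s.toList s.toList.length 1

-- ===== PRECONDITION & SPEC =====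
def Spec_solution (s : String) (out : Int) : Prop := out = solution_alt s
instance (s : String) (out : Int) : Decidable (Spec_solution s out) := by unfold Spec_solution; infer_instance

-- ===== CLAIM (what is proved, stated in full; the proofs are below) =====
def Claim_equal_solution : Prop := ∀ (s : String), Dom_solution s → Spec_solution s (solution s)

-- ===== LEMMAS AND PROOFS =====

def mapHead (f : List Char → List Char) : List (List Char) → List (List Char)
  | [] => []
  | p :: ps => f p :: ps
def sp (t : List Char) : Nat → List Char → List (List Char)
  | 0, l => [l]
  | _ + 1, [] => [[]]
  | fuel + 1, c :: rest =>
    if t.isPrefixOf (c :: rest) then [] :: sp t fuel ((c :: rest).drop t.length)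
    else mapHead (c :: ·) (sp t fuel rest)

theorem sp_ne_nil (t : List Char) (fuel : Nat) (l : List Char) : sp t fuel l ≠ [] := by
  induction fuel generalizing l with
  | zero => simp [sp]
  | succ f ih =>
    cases l with
    | nil => simp [sp]
    | cons c rest =>
      simp only [sp]
      split
      · simp
      · have := ih rest
        cases h : sp t f rest with
        | nil => exact absurd h this
        | cons p ps => simp [mapHead]

theorem go_eq (t : List Char) (fuel : Nat) (l cur : List Char) (acc : List (List Char)) :
    PySem.Chars.splitOn.go t fuel l cur acc = acc.reverse ++ mapHead (cur.reverse ++ ·) (sp t fuel l) := by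
  induction fuel generalizing l cur acc with
  | zero => simp [PySem.Chars.splitOn.go, sp, mapHead]
  | succ f ih =>
    cases l with
    | nil => simp [PySem.Chars.splitOn.go, sp, mapHead]
    | cons c rest =>
      rw [PySem.Chars.splitOn.go]
      simp only [sp]
      split
      · rw [ih]
        simp only [mapHead, List.reverse_cons, List.append_assoc, List.reverse_nil, List.nil_append,
          List.cons_append]
        cases h : sp t f (List.drop t.length (c :: rest)) with
        | nil => exact absurd h (sp_ne_nil _ _ _)
        | cons p ps => simp
      · rw [ih]
        cases h : sp t f rest with
        | nil => exact absurd h (sp_ne_nil t f rest)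
        | cons p ps => simp [mapHead]

theorem splitOn_eq (cs t : List Char) : PySem.Chars.splitOn cs t = sp t (cs.length + 1) cs := by
  rw [PySem.Chars.splitOn, go_eq]
  cases h : sp t (cs.length + 1) cs with
  | nil => exact absurd h (sp_ne_nil _ _ _)
  | cons p ps => simp [mapHead]

theorem intercalate_cons (t x : List Char) (ps : List (List Char)) (h : ps ≠ []) :
    t.intercalate (x :: ps) = x ++ t ++ t.intercalate ps := by
  cases ps with
  | nil => exact absurd rfl h
  | cons q qs => simp [List.intercalate, List.intersperse]

theorem sp_join (t : List Char) (ht : t ≠ []) (fuel : Nat) (l : List Char) (h : l.length < fuel) :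
    t.intercalate (sp t fuel l) = l := by
  induction fuel generalizing l with
  | zero => omega
  | succ f ih =>
    cases l with
    | nil => simp [sp, List.intercalate]
    | cons c rest =>
      simp only [sp]
      split
      · rename_i hpre
        have hpre' : t <+: (c :: rest) := by
          simpa [List.isPrefixOf_iff_prefix] using hpre
        rw [intercalate_cons _ _ _ (sp_ne_nil _ _ _), ih]
        · simp only [List.nil_append]
          exact List.prefix_iff_eq_append.mp hpre' |>.symm ▸ rfl
        · have h1 : 1 ≤ t.length := List.length_pos_iff.mpr ht
          simp only [List.length_drop, List.length_cons] at *
          omega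
      · cases hsp : sp t f rest with
        | nil => exact absurd hsp (sp_ne_nil _ _ _)
        | cons p ps =>
          have ihr := ih rest (by simp at h ⊢; omega)
          rw [hsp] at ihr
          cases ps with
          | nil =>
            simp [List.intercalate] at ihr ⊢
            simp [mapHead, ihr]
          | cons p2 ps2 =>
            simp only [mapHead]
            rw [intercalate_cons _ _ _ (by simp)] at ihr ⊢
            simp only [List.cons_append, List.append_assoc] at ihr ⊢
            rw [ihr]

theorem sp_of_tiles (t : List Char) (ht : t ≠ []) (m : Nat) : ∀ (fuel : Nat) (l : List Char),
    l = (List.replicate m t).flatten → l.length < fuel →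
    sp t fuel l = List.replicate (m + 1) ([] : List Char) := by
  induction m with
  | zero =>
    intro fuel l hl h
    subst hl
    simp only [List.replicate_zero, List.flatten_nil, List.length_nil] at h
    cases fuel with
    | zero => omega
    | succ f => simp [sp]
  | succ m ih =>
    intro fuel l hl h
    have hl' : l = t ++ (List.replicate m t).flatten := by simp [hl, List.replicate_succ]
    obtain ⟨c, t', rfl⟩ : ∃ c t', t = c :: t' := by
      cases t with | nil => exact absurd rfl ht | cons a b => exact ⟨a, b, rfl⟩
    subst hl'
    cases fuel with
    | zero => simp at h
    | succ f =>
      have hshape : (c :: t') ++ (List.replicate m (c :: t')).flatten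
          = c :: (t' ++ (List.replicate m (c :: t')).flatten) := by simp
      rw [hshape]
      simp only [sp]
      rw [if_pos]
      · have hd : List.drop (c :: t').length (c :: (t' ++ (List.replicate m (c :: t')).flatten))
            = (List.replicate m (c :: t')).flatten := by
          rw [← hshape]; exact List.drop_left ..
        rw [hd, ih f _ rfl (by simp at h ⊢; omega)]
        simp [List.replicate_succ]
      · rw [List.isPrefixOf_iff_prefix, ← hshape]
        exact ⟨_, rfl⟩

theorem len_intercalate (t : List Char) (ps : List (List Char)) (h : ps ≠ []) :
    (t.intercalate ps).length = (ps.map List.length).sum + (ps.length - 1) * t.length := by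
  induction ps with
  | nil => exact absurd rfl h
  | cons p qs ih =>
    cases qs with
    | nil => simp [List.intercalate]
    | cons q qs2 =>
      rw [intercalate_cons _ _ _ (by simp)]
      simp only [List.length_append, ih (by simp), List.map_cons, List.sum_cons, List.length_cons]
      have h1 : qs2.length + 1 + 1 - 1 = qs2.length + 1 := by omega
      have h2 : qs2.length + 1 - 1 = qs2.length := by omega
      rw [h1, h2]
      ring

theorem intercalate_replicate_nil (t : List Char) (k : Nat) :
    t.intercalate (List.replicate (k + 1) ([] : List Char)) = (List.replicate k t).flatten := by
  induction k with
  | zero => simp [List.intercalate]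
  | succ k ih =>
    rw [List.replicate_succ, intercalate_cons _ _ _ (by simp), ih]
    simp [List.replicate_succ]

theorem len_flatten_replicate (t : List Char) (m : Nat) :
    ((List.replicate m t).flatten).length = m * t.length := by
  simp [List.length_flatten]

abbrev ok (cs t : List Char) : Prop :=
  count_substring cs t * (t.length : Int) = (cs.length : Int)

theorem hlo_false_iff (cs t : List Char) : has_left_overs cs t = false ↔ ok cs t := by
  unfold has_left_overs ok
  split <;> simp_all

theorem ok_char (cs t : List Char) (ht : t ≠ []) (h : ok cs t) :
    t.length ∣ cs.length ∧ cs = (List.replicate (cs.length / t.length) t).flatten ∧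
      count_substring cs t = ((cs.length / t.length : Nat) : Int) := by
  have htl : 1 ≤ t.length := List.length_pos_iff.mpr ht
  unfold ok at h
  unfold count_substring at h ⊢
  by_cases h1 : cs.length = 1
  · rw [if_pos h1] at h ⊢
    by_cases he : cs = t
    · subst he
      rw [if_pos rfl] at h ⊢
      have hp : 0 < cs.length := by omega
      refine ⟨dvd_refl _, ?_, ?_⟩
      · rw [Nat.div_self hp]; simp
      · rw [Nat.div_self hp]; norm_num
    · rw [if_neg he] at h
      simp at h
      omega
  · rw [if_neg h1, if_neg ht] at h ⊢
    -- split-based case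
    have hsp := splitOn_eq cs t
    set ps := PySem.Chars.splitOn cs t with hps
    have hne : ps ≠ [] := by rw [hsp]; exact sp_ne_nil _ _ _
    have hk : 1 ≤ ps.length := List.length_pos_iff.mpr hne
    have hjoin : t.intercalate ps = cs := by rw [hsp]; exact sp_join t ht _ _ (by omega)
    have hlen : cs.length = (ps.map List.length).sum + (ps.length - 1) * t.length := by
      rw [← hjoin, len_intercalate t ps hne]
    -- from h : (ps.length - 1) * t.length = cs.length (as Int)
    have hcount : ((ps.length : Int) - 1) * (t.length : Int) = (cs.length : Int) := h
    have hcNat : (ps.length - 1) * t.length = cs.length := by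
      have hc : (((ps.length - 1 : Nat)) : Int) = (ps.length : Int) - 1 := by
        push_cast [Nat.cast_sub hk]; ring
      have : (((ps.length - 1) * t.length : Nat) : Int) = (cs.length : Int) := by
        push_cast [hc]; push_cast at hcount; linarith
      exact_mod_cast this
    have hsum : (ps.map List.length).sum = 0 := by omega
    have hall : ps = List.replicate ps.length ([] : List Char) := by
      apply List.eq_replicate_of_mem
      intro p hp
      have : p.length = 0 := by
        have := List.sum_eq_zero_iff.mp hsum (p.length) (List.mem_map_of_mem hp)
        exact this
      exact List.length_eq_zero_iff.mp this
    have hrep : cs = (List.replicate (ps.length - 1) t).flatten := by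
      rw [← hjoin, hall]
      have : ps.length = (ps.length - 1) + 1 := by omega
      rw [this, List.length_replicate] at *
      exact intercalate_replicate_nil t (ps.length - 1)
    have hdvd : t.length ∣ cs.length := ⟨ps.length - 1, by rw [← hcNat]; ring⟩
    have hdivv : cs.length / t.length = ps.length - 1 := by
      rw [← hcNat, Nat.mul_div_cancel _ (by omega)]
    refine ⟨hdvd, by rw [hdivv]; exact hrep, ?_⟩
    rw [hdivv, Nat.cast_sub hk]
    simp

theorem count_of_tiles (cs t : List Char) (ht : t ≠ []) (m : Nat) (hm : 1 ≤ m)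
    (hcs : cs = (List.replicate m t).flatten) :
    ok cs t ∧ count_substring cs t = (m : Int) := by
  have htl : 1 ≤ t.length := List.length_pos_iff.mpr ht
  have hlen : cs.length = m * t.length := by rw [hcs]; exact len_flatten_replicate t m
  unfold ok count_substring
  by_cases h1 : cs.length = 1
  · have hm1 : m = 1 ∧ t.length = 1 := by
      constructor <;> nlinarith
    have hcst : cs = t := by rw [hcs, hm1.1]; simp
    rw [if_pos h1, if_pos hcst]
    constructor
    · rw [h1, hm1.2]; norm_num
    · rw [hm1.1]; norm_num
  · rw [if_neg h1, if_neg ht]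
    have hsp : PySem.Chars.splitOn cs t = List.replicate (m + 1) [] := by
      rw [splitOn_eq]
      exact sp_of_tiles t ht m _ cs hcs (by omega)
    rw [hsp, List.length_replicate]
    constructor
    · push_cast
      rw [hlen]
      push_cast
      ring
    · push_cast; ring

theorem prefix_of_tiles (cs t : List Char) (m : Nat) (hm : 1 ≤ m)
    (hcs : cs = (List.replicate m t).flatten) : t = cs.take t.length := by
  have : cs = t ++ (List.replicate (m - 1) t).flatten := by
    rw [hcs]
    have : m = (m - 1) + 1 := by omega
    rw [this, List.replicate_succ]
    simp
  rw [this, List.take_left' rfl]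

def F (cs : List Char) (p : Int × Int) : Int :=
  if PySem.List.slice cs (some p.1) (some (p.2 + 1)) ≠ [] ∧
     ok cs (PySem.List.slice cs (some p.1) (some (p.2 + 1)))
  then count_substring cs (PySem.List.slice cs (some p.1) (some (p.2 + 1))) else 0

theorem foldl_foldl {α β γ : Type} (f : γ → α → β → γ) (is : List α) (js : List β) (a : γ) :
    is.foldl (fun a i => js.foldl (fun a j => f a i j) a) a
      = (is.flatMap (fun i => js.map (fun j => (i, j)))).foldl (fun a p => f a p.1 p.2) a := by
  induction is generalizing a with
  | nil => simp
  | cons i is ih => simp [List.foldl_append, List.foldl_map, ih]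

theorem step_eq_max (cs : List Char) (a : Int) (ha : 0 ≤ a) (p : Int × Int) :
    (if PySem.List.slice cs (some p.1) (some (p.2 + 1)) = [] then a
     else if has_left_overs cs (PySem.List.slice cs (some p.1) (some (p.2 + 1))) then a
     else if count_substring cs (PySem.List.slice cs (some p.1) (some (p.2 + 1))) > a
          then count_substring cs (PySem.List.slice cs (some p.1) (some (p.2 + 1))) else a)
      = max a (F cs p) := by
  unfold F
  by_cases hsub : PySem.List.slice cs (some p.1) (some (p.2 + 1)) = []
  · rw [if_pos hsub, if_neg (by simp [hsub])]
    exact (max_eq_left ha).symm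
  · rw [if_neg hsub]
    by_cases hok : ok cs (PySem.List.slice cs (some p.1) (some (p.2 + 1)))
    · have hb : has_left_overs cs (PySem.List.slice cs (some p.1) (some (p.2 + 1))) = false :=
        (hlo_false_iff _ _).mpr hok
      rw [hb, if_neg (by simp), if_pos (And.intro hsub hok)]
      by_cases h : count_substring cs (PySem.List.slice cs (some p.1) (some (p.2 + 1))) > a
      · rw [if_pos h, max_eq_right h.le]
      · rw [if_neg h, max_eq_left (not_lt.mp h)]
    · have hb : has_left_overs cs (PySem.List.slice cs (some p.1) (some (p.2 + 1))) = true := by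
        cases hb2 : has_left_overs cs (PySem.List.slice cs (some p.1) (some (p.2 + 1))) with
        | false => exact absurd ((hlo_false_iff _ _).mp hb2) hok
        | true => rfl
      rw [hb, if_pos rfl, if_neg (fun h => hok h.2)]
      exact (max_eq_left ha).symm

theorem foldl_step_eq (cs : List Char) (l : List (Int × Int)) (a : Int) (ha : 0 ≤ a) :
    l.foldl (fun sol p =>
      if PySem.List.slice cs (some p.1) (some (p.2 + 1)) = [] then sol
      else if has_left_overs cs (PySem.List.slice cs (some p.1) (some (p.2 + 1))) then sol
      else if count_substring cs (PySem.List.slice cs (some p.1) (some (p.2 + 1))) > sol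
           then count_substring cs (PySem.List.slice cs (some p.1) (some (p.2 + 1))) else sol) a
      = l.foldl (fun a p => max a (F cs p)) a := by
  induction l generalizing a with
  | nil => rfl
  | cons p l ih =>
    simp only [List.foldl_cons]
    rw [step_eq_max cs a ha p, ih _ (le_trans ha (le_max_left _ _))]

theorem solution_eq_foldmax (s : String) :
    solution s = ((PySem.List.pyRange 0 (s.toList.length : Int) 1).flatMap
        (fun i => (PySem.List.pyRange 0 (s.toList.length : Int) 1).map (fun j => (i, j)))).foldl
        (fun a p => max a (F s.toList p)) 0 := by
  unfold solution
  rw [foldl_foldl (f := fun (sol : Int) (i i2 : Int) =>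
      if PySem.List.slice s.toList (some i) (some (i2 + 1)) = [] then sol
      else if has_left_overs s.toList (PySem.List.slice s.toList (some i) (some (i2 + 1))) then sol
      else if count_substring s.toList (PySem.List.slice s.toList (some i) (some (i2 + 1))) > sol
           then count_substring s.toList (PySem.List.slice s.toList (some i) (some (i2 + 1))) else sol)]
  exact foldl_step_eq _ _ 0 le_rfl

abbrev pred (cs : List Char) (n d : Nat) : Prop :=
  d ∣ n ∧ (List.replicate (n / d) (cs.take d)).flatten = cs

theorem altGo_eq (cs : List Char) (n d0 : Nat) (hd0 : d0 ≤ n) (hp : pred cs n d0) :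
    ∀ gas d, d0 - d = gas → d ≤ d0 → (∀ e, d ≤ e → e < d0 → ¬ pred cs n e) →
    altGo cs n d = ((n / d0 : Nat) : Int) := by
  intro gas
  induction gas with
  | zero =>
    intro d hgas hd _
    have : d = d0 := by omega
    subst this
    rw [altGo, if_pos (by omega), if_pos ⟨Nat.mod_eq_zero_of_dvd hp.1, hp.2⟩]
  | succ k ih =>
    intro d hgas hd hmin
    have hlt : d < d0 := by omega
    rw [altGo, if_pos (by omega), if_neg]
    · exact ih (d + 1) (by omega) (by omega) (fun e he1 he2 => hmin e (by omega) he2)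
    · intro hcond
      exact hmin d le_rfl hlt ⟨Nat.dvd_of_mod_eq_zero hcond.1, hcond.2⟩

theorem main_eq (s : String) : solution s = solution_alt s := by
  rcases Nat.eq_zero_or_pos s.toList.length with h0 | h0
  · simp [solution_eq_foldmax, solution_alt, h0, altGo, PySem.List.pyRange]
  · have hself : pred s.toList s.toList.length s.toList.length := by
      refine ⟨dvd_refl _, ?_⟩
      rw [Nat.div_self h0]
      simp
    have hex : ∃ d, 0 < d ∧ pred s.toList s.toList.length d := ⟨s.toList.length, h0, hself⟩
    obtain ⟨hd0pos, hd0pred⟩ := Nat.find_spec hex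
    have hd0le : Nat.find hex ≤ s.toList.length := Nat.find_min' hex ⟨h0, hself⟩
    have hmin : ∀ e, 1 ≤ e → e < Nat.find hex → ¬ pred s.toList s.toList.length e := by
      intro e he1 he2 hp
      exact Nat.find_min hex he2 ⟨by omega, hp⟩
    have hB : solution_alt s = ((s.toList.length / Nat.find hex : Nat) : Int) := by
      unfold solution_alt
      exact altGo_eq s.toList s.toList.length (Nat.find hex) hd0le hd0pred
        (Nat.find hex - 1) 1 rfl hd0pos hmin
    have hm1 : 1 ≤ s.toList.length / Nat.find hex :=
      Nat.div_pos (Nat.le_of_dvd h0 hd0pred.1) hd0pos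
    rw [solution_eq_foldmax, hB]
    obtain ⟨hR0, hRub⟩ := PySem.List.le_foldl_max_int
      ((PySem.List.pyRange 0 (s.toList.length : Int) 1).flatMap
        (fun i => (PySem.List.pyRange 0 (s.toList.length : Int) 1).map (fun j => (i, j))))
      (F s.toList) 0
    apply le_antisymm
    · -- upper bound: every candidate value is n / d for some admissible divisor d ≥ d0
      rw [List.foldl_map (g := fun (a b : Int) => max a b) (f := F s.toList) |>.symm ]
      rcases PySem.List.foldl_max_mem
        (((PySem.List.pyRange 0 (s.toList.length : Int) 1).flatMap
          (fun i => (PySem.List.pyRange 0 (s.toList.length : Int) 1).map (fun j => (i, j)))).map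
          (F s.toList)) 0 with hc | hc
      · rw [hc]; exact Int.natCast_nonneg _
      · obtain ⟨p, hpL, hFp⟩ := List.mem_map.mp hc
        rw [← hFp]
        unfold F
        split
        · rename_i hcond
          obtain ⟨hne, hok⟩ := hcond
          obtain ⟨hdvd, htile, hcnt⟩ := ok_char _ _ hne hok
          rw [hcnt]
          have hm1' : 1 ≤ s.toList.length /
              (PySem.List.slice s.toList (some p.1) (some (p.2 + 1))).length :=
            Nat.div_pos (Nat.le_of_dvd h0 hdvd) (List.length_pos_iff.mpr hne)
          have hprefix := prefix_of_tiles _ _ _ hm1' htile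
          have hpredt : pred s.toList s.toList.length
              (PySem.List.slice s.toList (some p.1) (some (p.2 + 1))).length :=
            ⟨hdvd, by rw [← hprefix]; exact htile.symm⟩
          have hle : Nat.find hex ≤ (PySem.List.slice s.toList (some p.1) (some (p.2 + 1))).length :=
            Nat.find_min' hex ⟨List.length_pos_iff.mpr hne, hpredt⟩
          exact_mod_cast Nat.div_le_div_left hle hd0pos
        · exact Int.natCast_nonneg _
    · -- lower bound: the candidate (i, i2) = (0, d0 - 1) is scanned by A and achieves n / d0
      have hslice : PySem.List.slice s.toList (some (0 : Int)) (some (((Nat.find hex : Int) - 1) + 1))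
          = s.toList.take (Nat.find hex) := by
        have h1 : ((Nat.find hex : Int) - 1) + 1 = ((Nat.find hex : Nat) : Int) := by omega
        rw [h1, show (0 : Int) = ((0 : Nat) : Int) from rfl, PySem.List.slice_natCast]
        simp
      have htile0 : s.toList = (List.replicate (s.toList.length / Nat.find hex)
          (s.toList.take (Nat.find hex))).flatten := hd0pred.2.symm
      have hne0 : s.toList.take (Nat.find hex) ≠ [] := by
        apply List.length_pos_iff.mp
        rw [List.length_take]
        omega
      obtain ⟨hok0, hcnt0⟩ := count_of_tiles s.toList (s.toList.take (Nat.find hex)) hne0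
        (s.toList.length / Nat.find hex) hm1 htile0
      have hp0mem : ((0 : Int), ((Nat.find hex : Int) - 1)) ∈
          (PySem.List.pyRange 0 (s.toList.length : Int) 1).flatMap
            (fun i => (PySem.List.pyRange 0 (s.toList.length : Int) 1).map (fun j => (i, j))) := by
        rw [List.mem_flatMap]
        refine ⟨0, ?_, ?_⟩
        · rw [PySem.List.pyRange_zero_natCast]
          exact List.mem_map.mpr ⟨0, List.mem_range.mpr h0, rfl⟩
        · refine List.mem_map.mpr ⟨((Nat.find hex : Int) - 1), ?_, rfl⟩
          rw [PySem.List.pyRange_zero_natCast]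
          refine List.mem_map.mpr ⟨Nat.find hex - 1, List.mem_range.mpr (by omega), ?_⟩
          omega
      have hF0 : F s.toList ((0 : Int), ((Nat.find hex : Int) - 1))
          = ((s.toList.length / Nat.find hex : Nat) : Int) := by
        unfold F
        simp only [hslice]
        rw [if_pos ⟨hne0, hok0⟩, hcnt0]
      calc ((s.toList.length / Nat.find hex : Nat) : Int)
          = F s.toList ((0 : Int), ((Nat.find hex : Int) - 1)) := hF0.symm
        _ ≤ _ := hRub _ hp0mem

-- ===== VERDICT (by name: the statement is the Claim_ definition above) =====
theorem solution_spec : Claim_equal_solution := by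
  intro s _
  unfold Spec_solution
  exact main_eq s
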